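-- pv_equiv track=rewrite | github.com/pizzaz93/Coding-Bat-Python | Warmup - 2/string_splosion.py | string_splosion
-- ===== SOURCE A (Python) =====
-- def string_splosion(str):
--   newStr = ""
--   indexed = len(str)
--   for x in range(indexed):
--     if x == 0:
--       newStr += str[x: x + 1]
--     else:
--       newStr += str[0:x + 1]
--   return newStr
-- ===== SOURCE B (Python) =====
-- def string_splosion(str):
--     result = ""
--     prefix = ""
--     for ch in str:
--         prefix += ch
--         result += prefix
--     return result
-- ===== Notes on version B (the rewrite author's own statement) =====
-- stated objective: simpler
-- what changed: Replaces the index loop that re-slices the prefix str[0:x+1] from scratch each iteration (and its redundant x==0 branch) with a single character loop maintaining a running prefix accumulator.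
import Mathlib
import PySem

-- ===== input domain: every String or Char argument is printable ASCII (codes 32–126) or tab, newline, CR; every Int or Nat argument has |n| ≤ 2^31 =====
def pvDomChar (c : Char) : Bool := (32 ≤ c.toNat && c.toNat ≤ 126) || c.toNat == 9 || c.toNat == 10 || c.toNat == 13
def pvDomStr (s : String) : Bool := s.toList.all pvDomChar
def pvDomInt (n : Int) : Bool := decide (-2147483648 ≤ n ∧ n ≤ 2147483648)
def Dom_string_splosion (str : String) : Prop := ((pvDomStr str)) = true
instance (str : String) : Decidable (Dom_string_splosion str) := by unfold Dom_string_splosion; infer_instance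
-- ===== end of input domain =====

-- B replaces A's index loop that re-slices str[0:x+1] each iteration (with a redundant x==0 branch)
-- by a character loop maintaining a running prefix accumulator; objective: simpler.

-- ===== PORT A =====
-- for x in range(len(str)): if x == 0: newStr += str[x:x+1] else: newStr += str[0:x+1]
def string_splosion (str : String) : String :=
  let cs := str.toList
  String.ofList ((PySem.List.pyRange 0 (cs.length : Int) 1).foldl
    (fun (newStr : List Char) (x : Int) =>
      if x == 0 then newStr ++ PySem.List.slice cs (some x) (some (x + 1))
      else newStr ++ PySem.List.slice cs (some 0) (some (x + 1))) [])

-- ===== PORT B =====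
-- for ch in str: prefix += ch; result += prefix
def string_splosion_alt (str : String) : String :=
  String.ofList ((str.toList.foldl
    (fun (rp : List Char × List Char) (ch : Char) =>
      let p := rp.2 ++ [ch]
      (rp.1 ++ p, p)) ([], [])).1)

-- ===== PRECONDITION & SPEC =====
def Spec_string_splosion (str : String) (out : String) : Prop := out = string_splosion_alt str
instance (str : String) (out : String) : Decidable (Spec_string_splosion str out) := by unfold Spec_string_splosion; infer_instance

-- ===== CLAIM (what is proved, stated in full; the proofs are below) =====
def Claim_equal_string_splosion : Prop := ∀ (str : String), Dom_string_splosion str → Spec_string_splosion str (string_splosion str)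

-- ===== LEMMAS AND PROOFS =====

-- the "splosion" of l continuing from an already-read prefix p
def sploded (p l : List Char) : List Char :=
  match l with
  | [] => []
  | c :: t => (p ++ [c]) ++ sploded (p ++ [c]) t

theorem sploded_append (l : List Char) : ∀ (p : List Char) (ch : Char),
    sploded p (l ++ [ch]) = sploded p l ++ (p ++ l ++ [ch]) := by
  induction l with
  | nil => intro p ch; simp [sploded]
  | cons x t ih =>
    intro p ch
    simp only [List.cons_append, sploded]
    rw [ih]
    simp [List.append_assoc]

theorem b_fold_inv (l : List Char) : ∀ (r p : List Char),
    (l.foldl (fun (rp : List Char × List Char) (ch : Char) =>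
      let q := rp.2 ++ [ch]
      (rp.1 ++ q, q)) (r, p)) = (r ++ sploded p l, p ++ l) := by
  induction l with
  | nil => intro r p; simp [sploded]
  | cons x t ih => intro r p; simp [sploded, ih, List.append_assoc]

theorem a_fold_eq (cs : List Char) : ∀ (n : Nat), n ≤ cs.length →
    (PySem.List.pyRange 0 (n : Int) 1).foldl
      (fun (newStr : List Char) (x : Int) =>
        if x == 0 then newStr ++ PySem.List.slice cs (some x) (some (x + 1))
        else newStr ++ PySem.List.slice cs (some 0) (some (x + 1))) []
    = sploded [] (cs.take n) := by
  have hfun : (fun (newStr : List Char) (x : Int) =>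
        if x == 0 then newStr ++ PySem.List.slice cs (some x) (some (x + 1))
        else newStr ++ PySem.List.slice cs (some 0) (some (x + 1)))
      = (fun newStr x => newStr ++ PySem.List.slice cs (some 0) (some (x + 1))) := by
    funext s x
    by_cases h : x = 0
    · subst h; simp
    · simp [h]
  intro n
  simp only [hfun]
  induction n with
  | zero => intro _; simp [PySem.List.pyRange_one_eq_nil, sploded]
  | succ n ih =>
    intro hn
    have hn' : n ≤ cs.length := Nat.le_of_succ_le hn
    have hlt : n < cs.length := hn
    have hcast : ((n + 1 : Nat) : Int) = (n : Int) + 1 := by push_cast; ring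
    rw [hcast, PySem.List.pyRange_one_succ_right (by positivity), List.foldl_append, ih hn']
    have hslice : PySem.List.slice cs (some 0) (some ((n : Int) + 1)) = cs.take (n + 1) := by
      rw [PySem.List.slice_toNat cs (by omega) (by omega)]
      simp
    have htake : cs.take (n + 1) = cs.take n ++ [cs[n]] := by
      rw [List.take_add_one]
      simp [List.getElem?_eq_getElem hlt]
    simp only [List.foldl_cons, List.foldl_nil]
    rw [hslice, htake, sploded_append _ _ _]
    simp

-- ===== VERDICT (by name: the statement is the Claim_ definition above) =====
theorem string_splosion_spec : Claim_equal_string_splosion := by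
  intro str _
  unfold Spec_string_splosion string_splosion string_splosion_alt
  rw [b_fold_inv]
  simp only
  rw [a_fold_eq str.toList str.toList.length le_rfl, List.take_length]
  simp
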